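-- pv_equiv track=rewrite | github.com/Ndubireagan/web-app-for-streetlight-CP-monitoring | sms_reader.py | extract_sms_bodies
-- ===== SOURCE A (Python) =====
-- def extract_sms_bodies(response):
--     bodies = []
--     lines = response.splitlines()
--     for i, line in enumerate(lines):
--         if line.startswith("+CMGL:"):
--             if i + 1 < len(lines):
--                 bodies.append(lines[i + 1])
--     return bodies
-- ===== SOURCE B (Python) =====
-- def extract_sms_bodies(response):
--     bodies = []
--     take_next = False
--     for line in response.splitlines():
--         if take_next:
--             bodies.append(line)
--         take_next = line.startswith("+CMGL:")
--     return bodies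
-- ===== Notes on version B (the rewrite author's own statement) =====
-- stated objective: simpler
-- what changed: Replaced enumerate with i+1 look-ahead indexing by a single-pass state machine carrying a take_next flag that remembers whether the preceding line was a header, so no index arithmetic or length check is needed.
import Mathlib
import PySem

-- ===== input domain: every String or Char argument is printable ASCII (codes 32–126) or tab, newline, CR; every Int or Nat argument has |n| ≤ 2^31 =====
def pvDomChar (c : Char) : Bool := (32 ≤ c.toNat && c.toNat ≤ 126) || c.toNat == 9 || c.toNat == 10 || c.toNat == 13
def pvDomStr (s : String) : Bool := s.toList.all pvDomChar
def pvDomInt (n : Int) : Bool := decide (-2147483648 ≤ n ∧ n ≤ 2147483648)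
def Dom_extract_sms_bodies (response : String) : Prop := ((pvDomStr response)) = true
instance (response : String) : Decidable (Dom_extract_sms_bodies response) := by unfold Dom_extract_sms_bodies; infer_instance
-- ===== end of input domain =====

-- B replaces A's enumerate + i+1 look-ahead indexing by a one-flag state machine; objective: simpler.

-- ===== PORT A =====
-- lines[i + 1] is ported as pyGetD with default "": the guard i + 1 < len(lines) makes the lookup in range.
def extract_sms_bodies (response : String) : List String :=
  let lines := PySem.Str.splitlines response
  (PySem.List.enumerate lines).foldl
    (fun bodies p =>
      if PySem.Str.startswith p.2 "+CMGL:" then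
        if p.1 + 1 < (lines.length : Int) then
          bodies ++ [PySem.List.pyGetD lines (p.1 + 1) ""]
        else bodies
      else bodies) []

-- ===== PORT B =====
def extract_sms_bodies_alt (response : String) : List String :=
  ((PySem.Str.splitlines response).foldl
    (fun st line =>
      ((if st.2 then st.1 ++ [line] else st.1), PySem.Str.startswith line "+CMGL:"))
    (([] : List String), false)).1

-- ===== PRECONDITION & SPEC =====
def Spec_extract_sms_bodies (response : String) (out : List String) : Prop := out = extract_sms_bodies_alt response
instance (response : String) (out : List String) : Decidable (Spec_extract_sms_bodies response out) := by unfold Spec_extract_sms_bodies; infer_instance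

-- ===== CLAIM (what is proved, stated in full; the proofs are below) =====
def Claim_equal_extract_sms_bodies : Prop := ∀ (response : String), Dom_extract_sms_bodies response → Spec_extract_sms_bodies response (extract_sms_bodies response)

-- ===== LEMMAS AND PROOFS =====

-- A's fold step over the enumerated lines, indexing into the fixed list L
def pvStepA (L : List String) (bodies : List String) (p : Int × String) : List String :=
  if PySem.Str.startswith p.2 "+CMGL:" then
    if p.1 + 1 < (L.length : Int) then bodies ++ [PySem.List.pyGetD L (p.1 + 1) ""]
    else bodies
  else bodies

-- B's result as a structural recursion: the flag says 'the previous line was a header'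
def pvGB (flag : Bool) : List String → List String
  | [] => []
  | l :: ls => (if flag then [l] else []) ++ pvGB (PySem.Str.startswith l "+CMGL:") ls

lemma pvStepA_acc (L : List String) : ∀ (es : List (Int × String)) (acc : List String),
    es.foldl (pvStepA L) acc = acc ++ es.foldl (pvStepA L) [] := by
  intro es
  induction es with
  | nil => simp
  | cons p es ih =>
    intro acc
    simp only [List.foldl_cons]
    rw [ih, ih (pvStepA L [] p)]
    unfold pvStepA
    split_ifs <;> simp

-- shifting: indexing at i+1 into (c :: L) over enumerate starting at s+1
-- equals indexing at i+1 into L over enumerate starting at s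
lemma pvShift (c : String) (L : List String) : ∀ (xs : List String) (s : Int), 0 ≤ s →
    (PySem.List.enumerate xs (s + 1)).foldl (pvStepA (c :: L)) [] =
    (PySem.List.enumerate xs s).foldl (pvStepA L) [] := by
  intro xs
  induction xs with
  | nil => simp [PySem.List.enumerate]
  | cons x xs ih =>
    intro s hs
    rw [PySem.List.enumerate_cons, PySem.List.enumerate_cons]
    simp only [List.foldl_cons]
    rw [pvStepA_acc (c :: L) _ (pvStepA (c :: L) [] (s + 1, x)),
        pvStepA_acc L _ (pvStepA L [] (s, x)), ih (s + 1) (by omega)]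
    congr 1
    have hget : PySem.List.pyGetD (c :: L) (s + 1 + 1) "" = PySem.List.pyGetD L (s + 1) "" := by
      have h1 : s + 1 + 1 = ((s.toNat + 2 : Nat) : Int) := by omega
      have h2 : s + 1 = ((s.toNat + 1 : Nat) : Int) := by omega
      rw [h1, h2]
      clear h1 h2 hs
      generalize s.toNat = k
      simp only [PySem.List.pyGetD, PySem.List.pyGet?, PySem.List.pyIdx?, List.length_cons,
        Nat.cast_add, Nat.cast_one, Nat.cast_ofNat]
      split_ifs <;> first
        | (exfalso; omega)
        | simp [show ((k : Int) + 2).toNat = k + 2 from by omega,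
                show ((k : Int) + 1).toNat = k + 1 from by omega]
    unfold pvStepA
    simp only [hget, List.length_cons, Nat.cast_add, Nat.cast_one]
    split_ifs <;> first | rfl | (exfalso; omega)

lemma pvA_eq_gB : ∀ (xs : List String) (x : String),
    (PySem.List.enumerate (x :: xs) 0).foldl (pvStepA (x :: xs)) [] =
    pvGB (PySem.Str.startswith x "+CMGL:") xs := by
  intro xs
  induction xs with
  | nil =>
    intro x
    simp only [PySem.List.enumerate, List.foldl_cons, List.foldl_nil, pvStepA, pvGB,
      List.length_cons, List.length_nil]
    split_ifs <;> first | rfl | (exfalso; omega)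
  | cons y ys ih =>
    intro x
    rw [PySem.List.enumerate_cons]
    simp only [List.foldl_cons]
    rw [pvStepA_acc, pvShift x (y :: ys) (y :: ys) 0 (by omega), ih y]
    have hstep : pvStepA (x :: y :: ys) [] (0, x) =
        if PySem.Str.startswith x "+CMGL:" then [y] else [] := by
      simp only [pvStepA, PySem.List.pyGetD, PySem.List.pyGet?, PySem.List.pyIdx?,
        List.length_cons]
      norm_num
    rw [hstep]
    conv_rhs => rw [pvGB]

lemma pvB_inv : ∀ (ls : List String) (acc : List String) (flag : Bool),
    (ls.foldl (fun st line =>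
      ((if st.2 then st.1 ++ [line] else st.1), PySem.Str.startswith line "+CMGL:"))
      (acc, flag)).1 = acc ++ pvGB flag ls := by
  intro ls
  induction ls with
  | nil => simp [pvGB]
  | cons l ls ih =>
    intro acc flag
    simp only [List.foldl_cons]
    rw [ih]
    conv_rhs => rw [pvGB]
    cases flag <;> simp

-- ===== VERDICT (by name: the statement is the Claim_ definition above) =====
theorem extract_sms_bodies_spec : Claim_equal_extract_sms_bodies := by
  intro response _
  unfold Spec_extract_sms_bodies extract_sms_bodies extract_sms_bodies_alt
  rw [pvB_inv]
  cases h : PySem.Str.splitlines response with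
  | nil => simp [PySem.List.enumerate, pvGB]
  | cons x xs =>
    have := pvA_eq_gB xs x
    simp only [List.nil_append, pvGB]
    exact this
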